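-- pv_equiv track=rewrite | github.com/ShahViraj11/CSE-231-Projects | Labs/Lab 09/Lab 09b.py | build_word_index
-- ===== SOURCE A (Python) =====
-- import string
--
-- def build_word_index(input_file):
--     word_map = dict()
--     line_no = 0
--
--     for line in input_file:
--         line_no += 1
--         # YOUR COMMENT
--         word_lst = line.strip().split()
--
--         # YOUR COMMENT
--         word_lst = [w.lower().strip(string.punctuation) for w in word_lst]
--
--         for word in word_lst:
--
--             if word != "":
--                 if word not in word_map:
--                     word_map[word] = {line_no}
--                 else:
--                     word_map[word].add(line_no)
--
--     return word_map
-- ===== SOURCE B (Python) =====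
-- import string
--
-- def build_word_index(input_file):
--     tokens = [(w2, i)
--               for i, line in enumerate(input_file, 1)
--               for w in line.strip().split()
--               if (w2 := w.lower().strip(string.punctuation))]
--     order = list(dict.fromkeys(w for w, _ in tokens))
--     return {w: {ln for t, ln in tokens if t == w} for w in order}
-- ===== Notes on version B (the rewrite author's own statement) =====
-- stated objective: alternative
-- what changed: A builds the dict-of-sets incrementally inside one interleaved loop over lines and words; B first flattens the file into a single (word, line_no) token list, then builds the result with a dict comprehension that gathers each distinct word's line set from that list.
import Mathlib
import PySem

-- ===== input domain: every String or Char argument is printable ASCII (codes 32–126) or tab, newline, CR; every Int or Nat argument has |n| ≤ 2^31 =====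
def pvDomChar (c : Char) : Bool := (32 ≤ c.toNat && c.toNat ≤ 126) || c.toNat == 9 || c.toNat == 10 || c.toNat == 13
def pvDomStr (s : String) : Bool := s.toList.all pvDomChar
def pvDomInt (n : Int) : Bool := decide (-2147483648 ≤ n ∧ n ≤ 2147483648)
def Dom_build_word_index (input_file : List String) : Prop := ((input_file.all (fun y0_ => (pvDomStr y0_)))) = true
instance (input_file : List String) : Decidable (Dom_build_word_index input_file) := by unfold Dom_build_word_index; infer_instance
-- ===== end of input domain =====

-- B replaces A's single interleaved loop (mutating a dict of sets per token) by a tokenize-then-gather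
-- decomposition: one pass producing all (word, line_no) pairs, then one gather per distinct word
-- (objective: alternative — same results, different algorithm, not claimed faster).

-- string.punctuation
def pvPunct : String := "!\"#$%&'()*+,-./:;<=>?@[\\]^_`{|}~"

-- w.lower().strip(string.punctuation)   (used by both ports)
def pvClean (w : String) : String := PySem.Str.stripChars (PySem.Str.lower w) pvPunct

-- ===== PORT A =====
def build_word_index (input_file : List String) : List (String × List Int) :=
  (input_file.foldl
    (fun (st : PySem.Dict String (List Int) × Int) line =>
      let line_no := st.2 + 1
      let word_lst := PySem.Str.split₀ (PySem.Str.strip line)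
      let word_lst := word_lst.map pvClean
      let wm := word_lst.foldl
        (fun wm word =>
          if word ≠ "" then
            if wm.contains word = false then
              wm.insert word ([line_no] : List Int)          -- word_map[word] = {line_no}
            else
              wm.modify word [] (fun s => PySem.Set.add s line_no)  -- word_map[word].add(line_no)
          else wm) st.1
      (wm, line_no))
    (PySem.Dict.empty, 0)).1.items

-- ===== PORT B =====
def build_word_index_alt (input_file : List String) : List (String × List Int) :=
  let tokens : List (String × Int) :=
    (PySem.List.enumerate input_file 1).flatMap
      (fun p =>
        (((PySem.Str.split₀ (PySem.Str.strip p.2)).map pvClean).filter (fun w => w ≠ "")).map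
          (fun w => (w, p.1)))
  let order := PySem.List.dedup (tokens.map (·.1))
  order.map (fun w => (w, PySem.Set.ofList ((tokens.filter (fun q => q.1 == w)).map (·.2))))

-- ===== PRECONDITION & SPEC =====
def Spec_build_word_index (input_file : List String) (out : List (String × List Int)) : Prop := out = build_word_index_alt input_file
instance (input_file : List String) (out : List (String × List Int)) : Decidable (Spec_build_word_index input_file out) := by unfold Spec_build_word_index; infer_instance

-- ===== CLAIM (what is proved, stated in full; the proofs are below) =====
def Claim_equal_build_word_index : Prop := ∀ (input_file : List String), Dom_build_word_index input_file → Spec_build_word_index input_file (build_word_index input_file)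

-- ===== LEMMAS AND PROOFS =====

-- the cleaned, nonempty tokens of one line, paired with its line number
def pvToks (i : Int) (line : String) : List (String × Int) :=
  (((PySem.Str.split₀ (PySem.Str.strip line)).map pvClean).filter (fun w => w ≠ "")).map (fun w => (w, i))

-- the token stream of the whole file, numbering from i
def pvStream (i : Int) : List String → List (String × Int)
  | [] => []
  | l :: ls => pvToks i l ++ pvStream (i + 1) ls

def pvStep (d : PySem.Dict String (List Int)) (p : String × Int) : PySem.Dict String (List Int) :=
  d.modify p.1 [] (fun s => PySem.Set.add s p.2)

lemma pvStream_eq_flatMap (ls : List String) (i : Int) :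
    pvStream i ls = (PySem.List.enumerate ls i).flatMap
      (fun p =>
        (((PySem.Str.split₀ (PySem.Str.strip p.2)).map pvClean).filter (fun w => w ≠ "")).map
          (fun w => (w, p.1))) := by
  induction ls generalizing i with
  | nil => simp [pvStream, PySem.List.enumerate_nil]
  | cons l ls ih => simp [pvStream, PySem.List.enumerate_cons, ih, pvToks]

lemma pvBody_eq (d : PySem.Dict String (List Int)) (w : String) (i : Int) :
    (if d.contains w = false then d.insert w ([i] : List Int)
     else d.modify w [] (fun s => PySem.Set.add s i)) = pvStep d (w, i) := by
  by_cases hc : d.contains w = false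
  · simp only [hc, pvStep, PySem.Dict.modify,
      PySem.Dict.getD_of_not_contains d _ hc]
    rfl
  · simp [hc, pvStep]

lemma pvInner_eq (ws : List String) (d : PySem.Dict String (List Int)) (i : Int) :
    ws.foldl
      (fun wm word =>
        if word ≠ "" then
          if wm.contains word = false then wm.insert word ([i] : List Int)
          else wm.modify word [] (fun s => PySem.Set.add s i)
        else wm) d
    = ((ws.filter (fun w => w ≠ "")).map (fun w => (w, i))).foldl pvStep d := by
  induction ws generalizing d with
  | nil => rfl
  | cons w ws ih =>
    by_cases hw : w = ""
    · simpa [hw] using ih d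
    · simp only [List.foldl_cons, List.filter_cons, List.map_cons, hw, ne_eq,
        not_false_iff, if_true,  decide_false, Bool.not_false]
      rw [ih, pvBody_eq]
      simp [decide_not]

lemma pvOuter_eq (ls : List String) (d : PySem.Dict String (List Int)) (n : Int) :
    (ls.foldl
      (fun (st : PySem.Dict String (List Int) × Int) line =>
        let line_no := st.2 + 1
        let word_lst := PySem.Str.split₀ (PySem.Str.strip line)
        let word_lst := word_lst.map pvClean
        let wm := word_lst.foldl
          (fun wm word =>
            if word ≠ "" then
              if wm.contains word = false then wm.insert word ([line_no] : List Int)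
              else wm.modify word [] (fun s => PySem.Set.add s line_no)
            else wm) st.1
        (wm, line_no)) (d, n))
    = ((pvStream (n + 1) ls).foldl pvStep d, n + ls.length) := by
  induction ls generalizing d n with
  | nil => simp [pvStream]
  | cons l ls ih =>
    simp only [List.foldl_cons, pvStream, List.foldl_append]
    rw [pvInner_eq, ih]
    simp only [Prod.mk.injEq]
    refine ⟨by simp [pvToks], by push_cast [List.length_cons]; ring⟩

lemma pvGetD_fold (l : List (String × Int)) (d : PySem.Dict String (List Int)) (c : String) :
    (l.foldl pvStep d).getD c [] =
      PySem.Set.update (d.getD c []) ((l.filter (fun q => q.1 == c)).map (·.2)) := by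
  induction l generalizing d with
  | nil => simp [PySem.Set.update]
  | cons p l ih =>
    simp only [List.foldl_cons, List.filter_cons]
    rw [ih]
    by_cases h : p.1 = c
    · simp [pvStep, h, PySem.Set.update]
    · have h2 : ¬ c = p.1 := fun e => h e.symm
      have h' : (p.1 == c) = false := by simp [h]
      simp [pvStep, PySem.Dict.getD_modify, h2, h', PySem.Set.update]

lemma pvKeys_fold (l : List (String × Int)) (d : PySem.Dict String (List Int)) :
    (l.foldl pvStep d).keys = PySem.Set.update d.keys (l.map (·.1)) := by
  simpa [pvStep] using
    PySem.Dict.keys_foldl_modify_key l (·.1) [] (fun _ p s => PySem.Set.add s p.2) d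

lemma pvNodup_fold (l : List (String × Int)) :
    ((l.foldl pvStep PySem.Dict.empty).keys.Nodup) := by
  rw [pvKeys_fold]
  exact PySem.Set.nodup_update _ _ (by simp [PySem.Dict.keys_empty])

-- ===== VERDICT (by name: the statement is the Claim_ definition above) =====
theorem build_word_index_spec : Claim_equal_build_word_index := by
  intro input_file _
  unfold Spec_build_word_index build_word_index build_word_index_alt
  rw [pvOuter_eq]
  simp only [zero_add]
  rw [PySem.Dict.items_eq_map_keys _ (pvNodup_fold _) [], pvKeys_fold,
    ← pvStream_eq_flatMap]
  simp only [PySem.Dict.keys_empty, PySem.Set.update_nil_left, PySem.List.dedup_eq_ofList]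
  apply List.map_congr_left
  intro w hw
  rw [pvGetD_fold]
  simp [PySem.Dict.getD_empty, PySem.Set.update_nil_left]
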